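-- pv_equiv track=rewrite | github.com/eborche2/aoc2022 | Day15/day15.py | spiral_out
-- ===== SOURCE A (Python) =====
-- import copy
--
-- def calculate_distance(s, b):
--     valuex = s[0] - b[0]
--     valuey = s[1] - b[1]
--     return abs(valuex) + abs(valuey)
--
-- def spiral_out(max_distance, sensor, spiral_map):
--     # This worked but took too long
--     sensor_assignment = [sensor[0], sensor[1]]
--     start = [copy.deepcopy(sensor_assignment), copy.deepcopy(sensor_assignment), copy.deepcopy(sensor_assignment), copy.deepcopy(sensor_assignment)]
--     dirs = [[0, -1], [1, 0], [0, 1], [-1, 0]]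
--     stops = [False, False, False, False]
--     current = copy.deepcopy(start)
--     while False in stops:
--         for i, each in enumerate(start):
--             check = calculate_distance(sensor, each)
--             if check >= max_distance:
--                 stops[i] = True
--         for i, dir in enumerate(dirs):
--             current[i][0] += dir[0]
--             current[i][1] += dir[1]
--         for i, point in enumerate(current):
--             check = calculate_distance(sensor, point)
--             if check > max_distance:
--                 slide = i + 1
--                 if slide == 4:
--                     slide = 0
--                 start[i][0] += dirs[slide][0]
--                 current[i][0] = start[i][0]
--                 start[i][1] += dirs[slide][1]
--                 current[i][1] = start[i][1]
--                 continue
--             coords = (current[i][0], current[i][1])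
--             if coords in spiral_map:
--                 if spiral_map[coords] == '.':
--                     spiral_map[coords] = '#'
--             else:
--                 spiral_map[coords] = '#'
--     return spiral_map
-- ===== SOURCE B (Python) =====
-- def spiral_out(max_distance, sensor, spiral_map):
--     # Enumerate the diamond (minus its center) directly, column by column,
--     # in the exact interleaved order the four spiral cursors visit it.
--     # Like the original, this mutates spiral_map in place and returns it.
--     sx, sy = sensor[0], sensor[1]
--     for k in range(max_distance):
--         for j in range(1, max_distance - k + 1):
--             for coords in ((sx + k, sy - j), (sx + j, sy + k),
--                            (sx - k, sy + j), (sx - j, sy - k)):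
--                 if coords in spiral_map:
--                     if spiral_map[coords] == '.':
--                         spiral_map[coords] = '#'
--                 else:
--                     spiral_map[coords] = '#'
--     return spiral_map
-- ===== Notes on version B (the rewrite author's own statement) =====
-- stated objective: simpler
-- what changed: Replaced the four-cursor spiral simulation (mutable start/current/stops state, per-step Manhattan-distance checks and slide resets) by a direct closed-form enumeration of the diamond's points in the same visit order, via two nested ranges.
import Mathlib
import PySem

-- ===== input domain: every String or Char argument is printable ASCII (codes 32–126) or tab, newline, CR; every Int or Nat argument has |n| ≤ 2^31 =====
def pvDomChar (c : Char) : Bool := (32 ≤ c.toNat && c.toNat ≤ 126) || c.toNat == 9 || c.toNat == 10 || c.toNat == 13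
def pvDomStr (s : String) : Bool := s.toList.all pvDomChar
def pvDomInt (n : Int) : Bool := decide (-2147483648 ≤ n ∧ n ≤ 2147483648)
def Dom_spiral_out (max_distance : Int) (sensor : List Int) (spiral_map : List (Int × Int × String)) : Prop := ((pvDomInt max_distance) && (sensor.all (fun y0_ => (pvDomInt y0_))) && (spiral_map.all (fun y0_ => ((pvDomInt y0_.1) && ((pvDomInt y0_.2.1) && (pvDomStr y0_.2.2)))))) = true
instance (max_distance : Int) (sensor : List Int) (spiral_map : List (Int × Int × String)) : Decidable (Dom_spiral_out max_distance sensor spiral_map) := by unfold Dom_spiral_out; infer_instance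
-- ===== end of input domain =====

-- B replaces the four-cursor spiral simulation by a direct nested-range enumeration of the
-- diamond's points in the same visit order — simpler: two ranges instead of a 12-field state machine.
-- Both Pythons mutate spiral_map in place and return it; the equivalence is about the return value.

-- Shared dict primitives (the Python dict, keyed by the coordinate pair (x, y), represented as
-- the association list List (Int × Int × String) in insertion order; overwrite keeps position):
-- 'coords in spiral_map' / 'spiral_map[coords]' (first match):
def pvGet (m : List (Int × Int × String)) (x y : Int) : Option String :=
  match m with
  | [] => none
  | (a, b, v) :: t => if a = x ∧ b = y then some v else pvGet t x y

-- 'spiral_map[coords] = v' (overwrite in place, else append):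
def pvSet (m : List (Int × Int × String)) (x y : Int) (v : String) : List (Int × Int × String) :=
  match m with
  | [] => [(x, y, v)]
  | (a, b, w) :: t => if a = x ∧ b = y then (a, b, v) :: t else (a, b, w) :: pvSet t x y v

-- the common write rule both Pythons apply to one coordinate pair:
--   if coords in spiral_map: (if spiral_map[coords] == '.': spiral_map[coords] = '#') else: spiral_map[coords] = '#'
def pvMark (m : List (Int × Int × String)) (c : Int × Int) : List (Int × Int × String) :=
  match pvGet m c.1 c.2 with
  | some v => if v = "." then pvSet m c.1 c.2 "#" else m
  | none => pvSet m c.1 c.2 "#"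

-- ===== PORT A =====
-- calculate_distance(s, b) = abs(s[0]-b[0]) + abs(s[1]-b[1])  (abs as natAbs cast back to Int, exact)
def pvDist (s p : Int × Int) : Int := ((s.1 - p.1).natAbs : Int) + ((s.2 - p.2).natAbs : Int)

-- the body of the third 'for' loop for one cursor i: given its slide direction dirs[(i+1)%4],
-- its start and its (already moved) current point; returns (start, current, spiral_map) after the step.
def pvStep3 (md : Int) (s dslide st cur : Int × Int) (m : List (Int × Int × String)) :
    (Int × Int) × (Int × Int) × List (Int × Int × String) :=
  if pvDist s cur > md then
    ((st.1 + dslide.1, st.2 + dslide.2), (st.1 + dslide.1, st.2 + dslide.2), m)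
  else
    (st, cur, pvMark m cur)

-- the while loop; the Python lists of fixed length 4 (start, current, stops) are carried
-- componentwise and each 'for i, … in enumerate(…)' over them is unrolled to its four steps.
-- fuel bounds the number of while iterations (proved sufficient below); the loop itself
-- always terminates after at most (max_distance+1)*(max_distance+2) iterations.
def pvLoop (fuel : Nat) (md : Int) (s st0 st1 st2 st3 cur0 cur1 cur2 cur3 : Int × Int)
    (p0 p1 p2 p3 : Bool) (m : List (Int × Int × String)) : List (Int × Int × String) :=
  match fuel with
  | 0 => m
  | Nat.succ f =>
    if p0 && p1 && p2 && p3 then m  -- 'while False in stops'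
    else
      -- for i, each in enumerate(start): if calculate_distance(sensor, each) >= max_distance: stops[i] = True
      let q0 := if pvDist s st0 ≥ md then true else p0
      let q1 := if pvDist s st1 ≥ md then true else p1
      let q2 := if pvDist s st2 ≥ md then true else p2
      let q3 := if pvDist s st3 ≥ md then true else p3
      -- for i, dir in enumerate(dirs): current[i][0] += dir[0]; current[i][1] += dir[1]
      let c0 := (cur0.1 + 0, cur0.2 + (-1))
      let c1 := (cur1.1 + 1, cur1.2 + 0)
      let c2 := (cur2.1 + 0, cur2.2 + 1)
      let c3 := (cur3.1 + (-1), cur3.2 + 0)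
      -- for i, point in enumerate(current): … (slide with dirs[(i+1) % 4], or mark)
      let r0 := pvStep3 md s (1, 0) st0 c0 m
      let r1 := pvStep3 md s (0, 1) st1 c1 r0.2.2
      let r2 := pvStep3 md s (-1, 0) st2 c2 r1.2.2
      let r3 := pvStep3 md s (0, -1) st3 c3 r2.2.2
      pvLoop f md s r0.1 r1.1 r2.1 r3.1 r0.2.1 r1.2.1 r2.2.1 r3.2.1 q0 q1 q2 q3 r3.2.2

def spiral_out (max_distance : Int) (sensor : List Int) (spiral_map : List (Int × Int × String)) : List (Int × Int × String) :=
  match PySem.List.pyGet? sensor 0, PySem.List.pyGet? sensor 1 with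
  | some sx, some sy =>
      pvLoop ((max_distance.toNat + 1) * (max_distance.toNat + 2)) max_distance (sx, sy)
        (sx, sy) (sx, sy) (sx, sy) (sx, sy)
        (sx, sy) (sx, sy) (sx, sy) (sx, sy)
        false false false false spiral_map
  | _, _ => spiral_map  -- sensor[0] / sensor[1] raises IndexError: excluded by Pre_

-- ===== PORT B =====
-- the tuple of the four points written in round (k, j) (Source B's inner 'for coords in (…)'):
def pvFour (sx sy k j : Int) : List (Int × Int) :=
  [(sx + k, sy - j), (sx + j, sy + k), (sx - k, sy + j), (sx - j, sy - k)]

def spiral_out_alt (max_distance : Int) (sensor : List Int) (spiral_map : List (Int × Int × String)) : List (Int × Int × String) :=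
  match PySem.List.pyGet? sensor 0 with
  | none => spiral_map  -- sensor[0] raises IndexError: excluded by Pre_
  | some sx =>
    match PySem.List.pyGet? sensor 1 with
    | none => spiral_map  -- sensor[1] raises IndexError: excluded by Pre_
    | some sy =>
      (PySem.List.pyRange 0 max_distance 1).foldl (fun m k =>
        (PySem.List.pyRange 1 (max_distance - k + 1) 1).foldl (fun m j =>
          (pvFour sx sy k j).foldl pvMark m) m) spiral_map

-- ===== PRECONDITION & SPEC =====
-- Pre_ excludes only sensors with fewer than two entries, on which A raises IndexError.
def Pre_spiral_out (max_distance : Int) (sensor : List Int) (spiral_map : List (Int × Int × String)) : Prop :=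
  2 ≤ sensor.length
instance (max_distance : Int) (sensor : List Int) (spiral_map : List (Int × Int × String)) : Decidable (Pre_spiral_out max_distance sensor spiral_map) := by unfold Pre_spiral_out; infer_instance
def pvWitness_spiral_out : Int × List Int × (List (Int × Int × String)) := (2, [0, 0], [(0, 1, ".")])

def Spec_spiral_out (max_distance : Int) (sensor : List Int) (spiral_map : List (Int × Int × String)) (out : List (Int × Int × String)) : Prop := out = spiral_out_alt max_distance sensor spiral_map
instance (max_distance : Int) (sensor : List Int) (spiral_map : List (Int × Int × String)) (out : List (Int × Int × String)) : Decidable (Spec_spiral_out max_distance sensor spiral_map out) := by unfold Spec_spiral_out; infer_instance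

-- ===== CLAIM (what is proved, stated in full; the proofs are below) =====
def Claim_equal_spiral_out : Prop := ∀ (max_distance : Int) (sensor : List Int) (spiral_map : List (Int × Int × String)), Dom_spiral_out max_distance sensor spiral_map → Pre_spiral_out max_distance sensor spiral_map → Spec_spiral_out max_distance sensor spiral_map (spiral_out max_distance sensor spiral_map)

-- ===== LEMMAS AND PROOFS =====

-- the list of points still to be written, from column k, j marks already done in column k
def pvRest (m : Nat) (sx sy : Int) (k j : Nat) : List (Int × Int) :=
  if h : k < m then
    if h2 : j < m - k then pvFour sx sy (k : Int) ((j : Int) + 1) ++ pvRest m sx sy k (j + 1)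
    else pvRest m sx sy (k + 1) 0
  else []
termination_by (m - k, m - k - j)

-- one marking iteration: column k, the (j+1)-st step of each cursor stays inside the diamond
lemma pvLoop_mark (m k j : Nat) (f : Nat) (sx sy : Int) (mp : List (Int × Int × String))
    (hk : k < m) (hj : j < m - k) :
    pvLoop (f + 1) (m : Int) (sx, sy)
      (sx + (k : Int), sy) (sx, sy + (k : Int)) (sx - (k : Int), sy) (sx, sy - (k : Int))
      (sx + (k : Int), sy - (j : Int)) (sx + (j : Int), sy + (k : Int))
      (sx - (k : Int), sy + (j : Int)) (sx - (j : Int), sy - (k : Int))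
      false false false false mp
    = pvLoop f (m : Int) (sx, sy)
      (sx + (k : Int), sy) (sx, sy + (k : Int)) (sx - (k : Int), sy) (sx, sy - (k : Int))
      (sx + (k : Int), sy - ((j : Int) + 1)) (sx + ((j : Int) + 1), sy + (k : Int))
      (sx - (k : Int), sy + ((j : Int) + 1)) (sx - ((j : Int) + 1), sy - (k : Int))
      false false false false ((pvFour sx sy (k : Int) ((j : Int) + 1)).foldl pvMark mp) := by
  have h0 : ¬ pvDist (sx, sy) (sx + (k : Int), sy) ≥ (m : Int) := by simp only [pvDist]; omega
  have h1 : ¬ pvDist (sx, sy) (sx, sy + (k : Int)) ≥ (m : Int) := by simp only [pvDist]; omega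
  have h2 : ¬ pvDist (sx, sy) (sx - (k : Int), sy) ≥ (m : Int) := by simp only [pvDist]; omega
  have h3 : ¬ pvDist (sx, sy) (sx, sy - (k : Int)) ≥ (m : Int) := by simp only [pvDist]; omega
  have g0 : ¬ pvDist (sx, sy) ((sx + (k : Int)) + 0, (sy - (j : Int)) + (-1)) > (m : Int) := by
    simp only [pvDist]; omega
  have g1 : ¬ pvDist (sx, sy) ((sx + (j : Int)) + 1, (sy + (k : Int)) + 0) > (m : Int) := by
    simp only [pvDist]; omega
  have g2 : ¬ pvDist (sx, sy) ((sx - (k : Int)) + 0, (sy + (j : Int)) + 1) > (m : Int) := by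
    simp only [pvDist]; omega
  have g3 : ¬ pvDist (sx, sy) ((sx - (j : Int)) + (-1), (sy - (k : Int)) + 0) > (m : Int) := by
    simp only [pvDist]; omega
  simp only [pvLoop, pvStep3, pvFour, List.foldl, Bool.and_false, if_neg h0,
    if_neg h1, if_neg h2, if_neg h3, if_neg g0, if_neg g1, if_neg g2, if_neg g3]
  norm_num
  congr 1 <;> ring_nf

-- one sliding iteration: the cursors step outside the diamond, each start shifts to column k+1
lemma pvLoop_slide (m k j : Nat) (f : Nat) (sx sy : Int) (mp : List (Int × Int × String))
    (hk : k < m) (hj : m ≤ k + j) :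
    pvLoop (f + 1) (m : Int) (sx, sy)
      (sx + (k : Int), sy) (sx, sy + (k : Int)) (sx - (k : Int), sy) (sx, sy - (k : Int))
      (sx + (k : Int), sy - (j : Int)) (sx + (j : Int), sy + (k : Int))
      (sx - (k : Int), sy + (j : Int)) (sx - (j : Int), sy - (k : Int))
      false false false false mp
    = pvLoop f (m : Int) (sx, sy)
      (sx + ((k : Int) + 1), sy) (sx, sy + ((k : Int) + 1)) (sx - ((k : Int) + 1), sy)
      (sx, sy - ((k : Int) + 1))
      (sx + ((k : Int) + 1), sy - (0 : Int)) (sx + (0 : Int), sy + ((k : Int) + 1))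
      (sx - ((k : Int) + 1), sy + (0 : Int)) (sx - (0 : Int), sy - ((k : Int) + 1))
      false false false false mp := by
  have h0 : ¬ pvDist (sx, sy) (sx + (k : Int), sy) ≥ (m : Int) := by simp only [pvDist]; omega
  have h1 : ¬ pvDist (sx, sy) (sx, sy + (k : Int)) ≥ (m : Int) := by simp only [pvDist]; omega
  have h2 : ¬ pvDist (sx, sy) (sx - (k : Int), sy) ≥ (m : Int) := by simp only [pvDist]; omega
  have h3 : ¬ pvDist (sx, sy) (sx, sy - (k : Int)) ≥ (m : Int) := by simp only [pvDist]; omega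
  have g0 : pvDist (sx, sy) ((sx + (k : Int)) + 0, (sy - (j : Int)) + (-1)) > (m : Int) := by
    simp only [pvDist]; omega
  have g1 : pvDist (sx, sy) ((sx + (j : Int)) + 1, (sy + (k : Int)) + 0) > (m : Int) := by
    simp only [pvDist]; omega
  have g2 : pvDist (sx, sy) ((sx - (k : Int)) + 0, (sy + (j : Int)) + 1) > (m : Int) := by
    simp only [pvDist]; omega
  have g3 : pvDist (sx, sy) ((sx - (j : Int)) + (-1), (sy - (k : Int)) + 0) > (m : Int) := by
    simp only [pvDist]; omega
  simp only [pvLoop, pvStep3, Bool.and_false, if_neg h0, if_neg h1, if_neg h2,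
    if_neg h3, if_pos g0, if_pos g1, if_pos g2, if_pos g3]
  norm_num
  congr 1 <;> ring_nf

-- the last iteration (start at distance exactly m): all stops are set, the cursors slide, no marks
lemma pvLoop_last (m : Nat) (f : Nat) (sx sy : Int) (mp : List (Int × Int × String)) :
    pvLoop (f + 2) (m : Int) (sx, sy)
      (sx + (m : Int), sy) (sx, sy + (m : Int)) (sx - (m : Int), sy) (sx, sy - (m : Int))
      (sx + (m : Int), sy - (0 : Int)) (sx + (0 : Int), sy + (m : Int))
      (sx - (m : Int), sy + (0 : Int)) (sx - (0 : Int), sy - (m : Int))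
      false false false false mp = mp := by
  have h0 : pvDist (sx, sy) (sx + (m : Int), sy) ≥ (m : Int) := by simp only [pvDist]; omega
  have h1 : pvDist (sx, sy) (sx, sy + (m : Int)) ≥ (m : Int) := by simp only [pvDist]; omega
  have h2 : pvDist (sx, sy) (sx - (m : Int), sy) ≥ (m : Int) := by simp only [pvDist]; omega
  have h3 : pvDist (sx, sy) (sx, sy - (m : Int)) ≥ (m : Int) := by simp only [pvDist]; omega
  have g0 : pvDist (sx, sy) ((sx + (m : Int)) + 0, (sy - (0 : Int)) + (-1)) > (m : Int) := by
    simp only [pvDist]; omega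
  have g1 : pvDist (sx, sy) ((sx + (0 : Int)) + 1, (sy + (m : Int)) + 0) > (m : Int) := by
    simp only [pvDist]; omega
  have g2 : pvDist (sx, sy) ((sx - (m : Int)) + 0, (sy + (0 : Int)) + 1) > (m : Int) := by
    simp only [pvDist]; omega
  have g3 : pvDist (sx, sy) ((sx - (0 : Int)) + (-1), (sy - (m : Int)) + 0) > (m : Int) := by
    simp only [pvDist]; omega
  show pvLoop ((f + 1) + 1) _ _ _ _ _ _ _ _ _ _ _ _ _ _ _ = mp
  simp only [pvLoop, pvStep3, Bool.and_false, if_pos h0, if_pos h1, if_pos h2,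
    if_pos h3, if_pos g0, if_pos g1, if_pos g2, if_pos g3]
  simp

-- a non-positive radius: the single iteration sets every stop and slides, marking nothing
lemma pvLoop_nonpos (md : Int) (h : md ≤ 0) (sx sy : Int) (mp : List (Int × Int × String)) :
    pvLoop 2 md (sx, sy) (sx, sy) (sx, sy) (sx, sy) (sx, sy) (sx, sy) (sx, sy) (sx, sy) (sx, sy)
      false false false false mp = mp := by
  have h0 : pvDist (sx, sy) (sx, sy) ≥ md := by simp only [pvDist]; omega
  have g0 : pvDist (sx, sy) (sx + 0, sy + (-1)) > md := by simp only [pvDist]; omega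
  have g1 : pvDist (sx, sy) (sx + 1, sy + 0) > md := by simp only [pvDist]; omega
  have g2 : pvDist (sx, sy) (sx + 0, sy + 1) > md := by simp only [pvDist]; omega
  have g3 : pvDist (sx, sy) (sx + (-1), sy + 0) > md := by simp only [pvDist]; omega
  show pvLoop (1 + 1) _ _ _ _ _ _ _ _ _ _ _ _ _ _ _ = mp
  simp only [pvLoop, pvStep3, Bool.and_false, if_pos h0, if_pos g0, if_pos g1,
    if_pos g2, if_pos g3]
  simp

-- the loop invariant: from the state of column k after j marks, the loop writes exactly pvRest
lemma pvLoop_inv (m : Nat) (sx sy : Int) :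
    ∀ (fuel k j : Nat) (mp : List (Int × Int × String)),
      k ≤ m → j ≤ m - k → (k = m → j = 0) →
      (m - k) * (m + 2) + (m - k - j) + 2 ≤ fuel →
      pvLoop fuel (m : Int) (sx, sy)
        (sx + (k : Int), sy) (sx, sy + (k : Int)) (sx - (k : Int), sy) (sx, sy - (k : Int))
        (sx + (k : Int), sy - (j : Int)) (sx + (j : Int), sy + (k : Int))
        (sx - (k : Int), sy + (j : Int)) (sx - (j : Int), sy - (k : Int))
        false false false false mp
      = (pvRest m sx sy k j).foldl pvMark mp := by
  intro fuel
  induction fuel with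
  | zero => intro k j mp _ _ _ hf; omega
  | succ f ih =>
    intro k j mp hk hj hkm hf
    by_cases hklt : k < m
    · by_cases hjlt : j < m - k
      · -- marking iteration
        rw [pvLoop_mark m k j f sx sy mp hklt hjlt]
        rw [pvRest]
        rw [dif_pos hklt, dif_pos hjlt, List.foldl_append]
        have hcast : ((j : Int) + 1) = ((j + 1 : Nat) : Int) := by push_cast; ring
        rw [hcast]
        apply ih k (j + 1) _ hk (by omega) (by omega)
        have hgen : (m - k) * (m + 2) = (m - k) * (m + 2) := rfl
        omega
      · -- sliding iteration: j = m - k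
        rw [pvLoop_slide m k j f sx sy mp hklt (by omega)]
        rw [pvRest]
        rw [dif_pos hklt, dif_neg hjlt]
        have hcast : ((k : Int) + 1) = ((k + 1 : Nat) : Int) := by push_cast; ring
        have hcast0 : (0 : Int) = ((0 : Nat) : Int) := by norm_num
        rw [hcast, hcast0]
        apply ih (k + 1) 0 _ (by omega) (by omega) (by omega)
        -- fuel bookkeeping: (m-(k+1))*(m+2) + (m-(k+1)) + 2 ≤ f
        obtain ⟨b, hb⟩ : ∃ b, m - k = b + 1 := ⟨m - k - 1, by omega⟩
        have hb2 : m - (k + 1) = b := by omega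
        have hmul : (b + 1) * (m + 2) = b * (m + 2) + (m + 2) := by ring
        have hble : b ≤ m := by omega
        rw [hb2]
        rw [hb, hmul] at hf
        omega
    · -- k = m, j = 0: the final iteration
      have hkm' : k = m := by omega
      have hj0 : j = 0 := hkm hkm'
      subst hkm'; subst hj0
      obtain ⟨f', hf'⟩ : ∃ f', f + 1 = f' + 2 := ⟨f - 1, by omega⟩
      rw [hf']
      rw [pvRest, dif_neg (by omega : ¬ k < k)]
      simpa using pvLoop_last k f' sx sy mp

-- B's inner loop, from j marks done in column k, then the remaining columns
lemma pvInner_rest (m k : Nat) (sx sy : Int) (hk : k < m) :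
    ∀ (t j : Nat), m - k - j = t → j ≤ m - k → ∀ mp,
      (pvRest m sx sy k j).foldl pvMark mp
        = (pvRest m sx sy (k + 1) 0).foldl pvMark
            ((PySem.List.pyRange ((j : Int) + 1) ((m : Int) - (k : Int) + 1) 1).foldl
              (fun mm jj => (pvFour sx sy (k : Int) jj).foldl pvMark mm) mp) := by
  intro t
  induction t with
  | zero =>
    intro j ht hj mp
    have hj' : j = m - k := by omega
    rw [PySem.List.pyRange_one_eq_nil (by omega : ((m : Int) - (k : Int) + 1) ≤ (j : Int) + 1)]
    rw [pvRest, dif_pos hk, dif_neg (by omega : ¬ j < m - k)]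
    simp
  | succ t iht =>
    intro j ht hj mp
    have hjlt : j < m - k := by omega
    rw [pvRest, dif_pos hk, dif_pos hjlt, List.foldl_append]
    rw [PySem.List.pyRange_one_cons (by omega : (j : Int) + 1 < (m : Int) - (k : Int) + 1)]
    rw [List.foldl_cons]
    have := iht (j + 1) (by omega) (by omega)
      ((pvFour sx sy (k : Int) ((j : Int) + 1)).foldl pvMark mp)
    rw [show ((j + 1 : Nat) : Int) = (j : Int) + 1 by push_cast; ring] at this
    rw [this]

-- B's outer loop over the remaining columns equals folding pvRest
lemma pvOuter_rest (m : Nat) (sx sy : Int) :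
    ∀ (t k : Nat), m - k = t → k ≤ m → ∀ mp,
      (PySem.List.pyRange (k : Int) (m : Int) 1).foldl
          (fun mm kk =>
            (PySem.List.pyRange 1 ((m : Int) - kk + 1) 1).foldl
              (fun m2 jj => (pvFour sx sy kk jj).foldl pvMark m2) mm) mp
        = (pvRest m sx sy k 0).foldl pvMark mp := by
  intro t
  induction t with
  | zero =>
    intro k ht hk mp
    have hk' : k = m := by omega
    rw [PySem.List.pyRange_one_eq_nil (by omega : (m : Int) ≤ (k : Int))]
    rw [pvRest, dif_neg (by omega : ¬ k < m)]
    simp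
  | succ t iht =>
    intro k ht hk mp
    have hklt : k < m := by omega
    rw [PySem.List.pyRange_one_cons (by omega : (k : Int) < (m : Int))]
    rw [List.foldl_cons]
    rw [show (k : Int) + 1 = ((k + 1 : Nat) : Int) by push_cast; ring]
    rw [iht (k + 1) (by omega) (by omega)]
    have := pvInner_rest m k sx sy hklt (m - k) 0 (by omega) (by omega) mp
    rw [show ((0 : Nat) : Int) + 1 = 1 by norm_num] at this
    exact this.symm

-- ===== VERDICT (by name: the statement is the Claim_ definition above) =====
theorem spiral_out_spec : Claim_equal_spiral_out := by
  intro md sensor mp _hdom hpre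
  unfold Spec_spiral_out
  unfold Pre_spiral_out at hpre
  rcases sensor with _ | ⟨a, rest⟩
  · simp at hpre
  rcases rest with _ | ⟨b, t⟩
  · simp at hpre
  unfold spiral_out spiral_out_alt
  have h0 : PySem.List.pyGet? (a :: b :: t) (0 : Int) = some a := by
    simp [PySem.List.pyGet?_zero_cons]
  have h1 : PySem.List.pyGet? (a :: b :: t) (1 : Int) = some b := by
    rw [show (1 : Int) = ((0 : Nat) : Int) + 1 by norm_num, PySem.List.pyGet?_cons_succ]
    simp
  rw [h0, h1]
  by_cases hmd : md ≤ 0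
  · rw [PySem.List.pyRange_one_eq_nil (by omega : md ≤ 0)]
    have htn : md.toNat = 0 := by omega
    rw [htn]
    norm_num
    exact pvLoop_nonpos md hmd a b mp
  · obtain ⟨m, rfl⟩ : ∃ m : Nat, md = (m : Int) :=
      ⟨md.toNat, (Int.toNat_of_nonneg (by omega)).symm⟩
    simp only [Int.toNat_natCast]
    have hfuel : (m - 0) * (m + 2) + (m - 0 - 0) + 2 ≤ (m + 1) * (m + 2) := by
      simp only [Nat.sub_zero]
      rw [show (m + 1) * (m + 2) = m * (m + 2) + (m + 2) by ring]
      generalize m * (m + 2) = X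
      omega
    have key := pvLoop_inv m a b ((m + 1) * (m + 2)) 0 0 mp
      (by omega) (by omega) (by omega) hfuel
    simp only [Nat.cast_zero, add_zero, sub_zero] at key
    rw [key]
    have outer := pvOuter_rest m a b m 0 (by omega) (by omega) mp
    simp only [Nat.cast_zero] at outer
    exact outer.symm
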